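-- pv_equiv track=rewrite | github.com/MostlyArmless/habit-bot | scan_npm_vulnerabilities.py | _parse_versions
-- ===== SOURCE A (Python) =====
-- from typing import Dict, List, Set, Tuple, Optional
--
-- def _parse_versions(version_columns: list) -> List[str]:
--     """
--     Parse versions from CSV columns.
--     Supports:
--     - Multiple versions in separate columns: ['1.0.0', '1.0.1', '1.0.2']
--     - Comma-separated versions in one column: ['1.0.0, 1.0.1, 1.0.2']
--     - Mix of both
--     """
--     versions = []
--     for col in version_columns:
--         col = col.strip()
--         if not col:
--             continue
--         # Split by comma in case multiple versions are in one field
--         for version in col.split(','):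
--             version = version.strip()
--             if version:
--                 versions.append(version)
--     return versions
-- ===== SOURCE B (Python) =====
-- from typing import List
--
-- def _parse_versions(version_columns: list) -> List[str]:
--     """Flatten all columns into one comma-separated string, then split once."""
--     all_versions = ",".join(version_columns)
--     return [v.strip() for v in all_versions.split(",") if v.strip()]
-- ===== Notes on version B (the rewrite author's own statement) =====
-- stated objective: simpler
-- what changed: Replaces A's nested per-column loop (strip column, skip empties, split, strip pieces, append) with a flatten-first shape: join all columns with ',' and do one split-strip-filter comprehension over the combined string.
import Mathlib
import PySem

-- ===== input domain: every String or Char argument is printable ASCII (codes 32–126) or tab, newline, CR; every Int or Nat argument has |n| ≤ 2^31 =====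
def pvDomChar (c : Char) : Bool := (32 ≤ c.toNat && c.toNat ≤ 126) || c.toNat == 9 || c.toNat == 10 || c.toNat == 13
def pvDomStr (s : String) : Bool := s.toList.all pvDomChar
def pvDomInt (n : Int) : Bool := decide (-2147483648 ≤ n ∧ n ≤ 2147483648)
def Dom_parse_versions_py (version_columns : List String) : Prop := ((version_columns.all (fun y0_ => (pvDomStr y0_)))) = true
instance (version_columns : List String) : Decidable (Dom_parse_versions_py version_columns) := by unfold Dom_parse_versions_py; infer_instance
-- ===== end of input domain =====

-- B replaces A's nested per-column loop by joining all columns with ',' first, then one split/strip/filter pass (objective: simpler).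

-- ===== PORT A =====
def parse_versions_py (version_columns : List String) : List String :=
  version_columns.foldl
    (fun versions col0 =>
      let col := PySem.Str.strip col0
      if col = "" then versions
      else
        ((PySem.Str.split? col ",").getD []).foldl
          (fun vs v0 =>
            let v := PySem.Str.strip v0
            if v = "" then vs else vs ++ [v])
          versions)
    []

-- ===== PORT B =====
def parse_versions_py_alt (version_columns : List String) : List String :=
  let all_versions := PySem.Str.join "," version_columns
  (((PySem.Str.split? all_versions ",").getD []).filter
      (fun v => PySem.Str.strip v != "")).map PySem.Str.strip

-- ===== PRECONDITION & SPEC =====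
def Spec_parse_versions_py (version_columns : List String) (out : List String) : Prop := out = parse_versions_py_alt version_columns
instance (version_columns : List String) (out : List String) : Decidable (Spec_parse_versions_py version_columns out) := by unfold Spec_parse_versions_py; infer_instance

-- ===== CLAIM (what is proved, stated in full; the proofs are below) =====
def Claim_equal_parse_versions_py : Prop := ∀ (version_columns : List String), Dom_parse_versions_py version_columns → Spec_parse_versions_py version_columns (parse_versions_py version_columns)

-- ===== LEMMAS AND PROOFS =====

-- splitOn with separator "," described as a simple structural recursion
def socC : List Char → List (List Char)
  | [] => [[]]
  | c :: rest =>
    if c = ',' then [] :: socC rest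
    else
      match socC rest with
      | [] => [[c]]
      | h :: t => (c :: h) :: t

-- append a char to the last piece
def apLast (c : Char) : List (List Char) → List (List Char)
  | [] => [[c]]
  | [h] => [h ++ [c]]
  | h :: h' :: t => h :: apLast c (h' :: t)

-- map strip, keep the nonempty results
def msf (l : List (List Char)) : List (List Char) :=
  (l.map PySem.Chars.strip).filter (fun v => !v.isEmpty)

-- the whole per-string pipeline at the List Char level
def FC (s : List Char) : List (List Char) := msf (socC s)

theorem socC_ne_nil (s : List Char) : socC s ≠ [] := by
  cases s with
  | nil => simp [socC]
  | cons c rest =>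
    simp only [socC]
    split
    · simp
    · cases h : socC rest <;> simp

theorem splitOn_go_comma (fuel : Nat) :
    ∀ (l cur : List Char) (acc : List (List Char)), l.length ≤ fuel →
      PySem.Chars.splitOn.go [','] fuel l cur acc =
        acc.reverse ++ (match socC l with
          | [] => []
          | h :: t => (cur.reverse ++ h) :: t) := by
  induction fuel with
  | zero =>
    intro l cur acc hl
    have : l = [] := List.eq_nil_of_length_eq_zero (Nat.le_zero.mp hl)
    subst this
    simp [PySem.Chars.splitOn.go, socC]
  | succ fuel ih =>
    intro l cur acc hl
    cases l with
    | nil => simp [PySem.Chars.splitOn.go, socC]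
    | cons c rest =>
      by_cases hc : c = ','
      · subst hc
        have hpre : List.isPrefixOf [','] (',' :: rest) = true := by
          simp [List.isPrefixOf]
        rw [PySem.Chars.splitOn.go]
        simp only [hpre, if_true]
        have : List.drop (List.length [',']) (',' :: rest) = rest := by simp
        rw [this, ih rest [] (cur.reverse :: acc) (by simpa using Nat.le_of_succ_le_succ hl)]
        cases h : socC rest with
        | nil => exact absurd h (socC_ne_nil rest)
        | cons h' t => simp [socC, h]
      · have hpre : List.isPrefixOf [','] (c :: rest) = false := by
          simp [List.isPrefixOf]
          intro h; exact absurd h.symm hc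
        rw [PySem.Chars.splitOn.go]
        simp only [hpre]
        rw [ih rest (c :: cur) acc (by simpa using Nat.le_of_succ_le_succ hl)]
        cases h : socC rest with
        | nil => exact absurd h (socC_ne_nil rest)
        | cons h' t => simp [socC, h, hc]

theorem splitOn_comma_eq (s : List Char) : PySem.Chars.splitOn s [','] = socC s := by
  unfold PySem.Chars.splitOn
  rw [splitOn_go_comma (s.length + 1) s [] [] (Nat.le_succ _)]
  cases h : socC s with
  | nil => exact absurd h (socC_ne_nil s)
  | cons h' t => simp

theorem socC_append (a b : List Char) : socC (a ++ ',' :: b) = socC a ++ socC b := by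
  induction a with
  | nil => simp [socC]
  | cons c a ih =>
    by_cases hc : c = ','
    · subst hc; simp [socC, ih]
    · simp only [List.cons_append, socC, hc, if_false, ih]
      cases h : socC a with
      | nil => exact absurd h (socC_ne_nil a)
      | cons h' t => simp

theorem socC_snoc (c : Char) (hc : c ≠ ',') (s : List Char) :
    socC (s ++ [c]) = apLast c (socC s) := by
  induction s with
  | nil => simp [socC, apLast, hc]
  | cons d s ih =>
    by_cases hd : d = ','
    · subst hd
      simp only [List.cons_append, socC, if_true, ih]
      cases h : socC s with
      | nil => exact absurd h (socC_ne_nil s)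
      | cons h' t => cases t <;> simp [apLast]
    · simp only [List.cons_append, socC, hd, if_false, ih]
      cases h : socC s with
      | nil => exact absurd h (socC_ne_nil s)
      | cons h' t =>
        cases t with
        | nil => simp [apLast]
        | cons h'' t' => simp [apLast]

theorem strip_cons_ws (c : Char) (hc : PySem.Chars.isspace c = true) (s : List Char) :
    PySem.Chars.strip (c :: s) = PySem.Chars.strip s := by
  simp [PySem.Chars.strip, PySem.Chars.lstrip, List.dropWhile, hc]

theorem ws_ne_comma (c : Char) (hc : PySem.Chars.isspace c = true) : c ≠ ',' := by
  intro h; subst h; exact absurd hc (by decide)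

theorem rstrip_snoc_ws (c : Char) (hc : PySem.Chars.isspace c = true) (s : List Char) :
    PySem.Chars.rstrip (s ++ [c]) = PySem.Chars.rstrip s := by
  simp [PySem.Chars.rstrip, hc]

theorem lstrip_snoc (c : Char) (s : List Char) :
    PySem.Chars.lstrip (s ++ [c]) =
      if PySem.Chars.lstrip s = [] then PySem.Chars.lstrip [c]
      else PySem.Chars.lstrip s ++ [c] := by
  induction s with
  | nil => simp [PySem.Chars.lstrip]
  | cons d s ih =>
    by_cases hd : PySem.Chars.isspace d = true
    · simpa [PySem.Chars.lstrip, List.dropWhile, hd] using ih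
    · simp [PySem.Chars.lstrip, List.dropWhile, hd]

theorem strip_snoc_ws (c : Char) (hc : PySem.Chars.isspace c = true) (s : List Char) :
    PySem.Chars.strip (s ++ [c]) = PySem.Chars.strip s := by
  simp only [PySem.Chars.strip, lstrip_snoc]
  split
  · rename_i h
    rw [h]
    simp [PySem.Chars.lstrip, List.dropWhile, hc, PySem.Chars.rstrip]
  · exact rstrip_snoc_ws c hc _

theorem msf_append (a b : List (List Char)) : msf (a ++ b) = msf a ++ msf b := by
  simp [msf]

theorem msf_cons (x : List Char) (r : List (List Char)) :
    msf (x :: r) =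
      if (PySem.Chars.strip x).isEmpty then msf r
      else PySem.Chars.strip x :: msf r := by
  simp only [msf, List.map_cons, List.filter_cons]
  split <;> rename_i h
  · rw [if_neg]; intro h2; simp [h2] at h
  · rw [if_pos]; simp at h; simp [h]

theorem msf_apLast (c : Char) (hc : PySem.Chars.isspace c = true) (l : List (List Char)) :
    msf (apLast c l) = msf l := by
  induction l with
  | nil =>
    have : PySem.Chars.strip [c] = [] := by
      rw [strip_cons_ws c hc []]; rfl
    simp [apLast, msf, this]
  | cons h t ih =>
    cases t with
    | nil =>
      simp [apLast, msf_cons, strip_snoc_ws c hc h]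
    | cons h' t' =>
      simp only [apLast, msf_cons, ih]

theorem FC_cons_ws (c : Char) (hc : PySem.Chars.isspace c = true) (s : List Char) :
    FC (c :: s) = FC s := by
  unfold FC
  have hcomma : c ≠ ',' := ws_ne_comma c hc
  simp only [socC, hcomma, if_false]
  cases h : socC s with
  | nil => exact absurd h (socC_ne_nil s)
  | cons h' t => simp [msf_cons, strip_cons_ws c hc h']

theorem FC_snoc_ws (c : Char) (hc : PySem.Chars.isspace c = true) (s : List Char) :
    FC (s ++ [c]) = FC s := by
  unfold FC
  rw [socC_snoc c (ws_ne_comma c hc) s, msf_apLast c hc]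

theorem FC_lstrip (s : List Char) : FC (PySem.Chars.lstrip s) = FC s := by
  induction s with
  | nil => rfl
  | cons c s ih =>
    by_cases hc : PySem.Chars.isspace c = true
    · rw [FC_cons_ws c hc s, ← ih]
      simp [PySem.Chars.lstrip, List.dropWhile, hc]
    · simp [PySem.Chars.lstrip, List.dropWhile, hc]

theorem FC_rev_dropWhile (t : List Char) :
    FC (List.dropWhile PySem.Chars.isspace t).reverse = FC t.reverse := by
  induction t with
  | nil => rfl
  | cons c t ih =>
    by_cases hc : PySem.Chars.isspace c = true
    · rw [List.dropWhile_cons_of_pos hc, ih, List.reverse_cons, FC_snoc_ws c hc]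
    · rw [List.dropWhile_cons_of_neg (by simpa using hc)]

theorem FC_rstrip (s : List Char) : FC (PySem.Chars.rstrip s) = FC s := by
  have := FC_rev_dropWhile s.reverse
  simpa [PySem.Chars.rstrip] using this

theorem FC_strip (s : List Char) : FC (PySem.Chars.strip s) = FC s := by
  rw [PySem.Chars.strip, FC_rstrip, FC_lstrip]

theorem FC_nil : FC [] = [] := rfl

theorem FC_join (ls : List (List Char)) :
    FC (PySem.Chars.join [','] ls) = ls.flatMap FC := by
  induction ls with
  | nil => simp [PySem.Chars.join_nil, FC_nil]
  | cons x t ih =>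
    cases t with
    | nil => simp [PySem.Chars.join_singleton]
    | cons y t' =>
      rw [PySem.Chars.join_cons_cons]
      have : x ++ [','] ++ PySem.Chars.join [','] (y :: t') =
          x ++ ',' :: PySem.Chars.join [','] (y :: t') := by simp
      rw [this]
      unfold FC
      rw [socC_append, msf_append, ← FC, ← FC, ih]
      rfl

-- ===== string-level characterizations =====

def msfS (l : List String) : List String :=
  (l.map PySem.Str.strip).filter (fun v => v != "")

theorem inner_foldl_eq (l : List String) (vs : List String) :
    l.foldl
      (fun vs v0 =>
        let v := PySem.Str.strip v0
        if v = "" then vs else vs ++ [v]) vs = vs ++ msfS l := by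
  induction l generalizing vs with
  | nil => simp [msfS]
  | cons x l ih =>
    simp only [List.foldl_cons, msfS, List.map_cons, List.filter_cons]
    by_cases hx : PySem.Str.strip x = ""
    · simp only [hx]
      have : ("" != "") = false := by decide
      rw [hx] at *
      simpa [msfS, this] using ih vs
    · rw [if_neg hx]
      have : (PySem.Str.strip x != "") = true := by simpa using hx
      rw [this, if_pos rfl]
      simpa [msfS] using ih (vs ++ [PySem.Str.strip x])

def gA (s : String) : List String :=
  if PySem.Str.strip s = "" then []
  else msfS ((PySem.Str.split? (PySem.Str.strip s) ",").getD [])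

theorem portA_eq_flatMap (cols : List String) :
    parse_versions_py cols = cols.flatMap gA := by
  unfold parse_versions_py
  suffices h : ∀ acc, cols.foldl
      (fun versions col0 =>
        let col := PySem.Str.strip col0
        if col = "" then versions
        else
          ((PySem.Str.split? col ",").getD []).foldl
            (fun vs v0 =>
              let v := PySem.Str.strip v0
              if v = "" then vs else vs ++ [v])
            versions) acc = acc ++ cols.flatMap gA by
    simpa using h []
  intro acc
  induction cols generalizing acc with
  | nil => simp
  | cons x t ih =>
    rw [List.foldl_cons]
    have hstep :
        (let col := PySem.Str.strip x;
         if col = "" then acc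
         else
           List.foldl
             (fun vs v0 => let v := PySem.Str.strip v0; if v = "" then vs else vs ++ [v])
             acc ((PySem.Str.split? col ",").getD [])) =
        acc ++ gA x := by
      by_cases hx : PySem.Str.strip x = ""
      · simp [hx, gA]
      · simp [hx, gA, inner_foldl_eq]
    rw [hstep, ih]
    simp

theorem filter_map_strip (l : List String) :
    (l.filter (fun v => PySem.Str.strip v != "")).map PySem.Str.strip = msfS l := by
  induction l with
  | nil => rfl
  | cons x t ih =>
    simp only [msfS, List.map_cons, List.filter_cons] at *
    by_cases hx : PySem.Str.strip x = ""
    · have h1 : (PySem.Str.strip x != "") = false := by simpa using hx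
      rw [h1]; simpa [msfS] using ih
    · have h1 : (PySem.Str.strip x != "") = true := by simpa using hx
      rw [h1]
      simpa [msfS, h1] using congrArg (PySem.Str.strip x :: ·) ih

theorem split?_comma_getD (s : String) :
    (PySem.Str.split? s ",").getD [] = (socC s.toList).map String.ofList := by
  have h := PySem.Str.split?_map s ","
  have hsep : ("," : String).toList = [','] := by decide
  rw [hsep] at h
  rw [PySem.Chars.split?] at h
  simp only [List.isEmpty_cons] at h
  cases hs : PySem.Str.split? s "," with
  | none => rw [hs] at h; simp at h
  | some X =>
    rw [hs] at h
    simp only [Option.map_some] at h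
    have hX : X.map String.toList = PySem.Chars.splitOn s.toList [','] := by
      simpa using h
    rw [splitOn_comma_eq] at hX
    have : X = (socC s.toList).map String.ofList := by
      rw [← hX, List.map_map]
      have : (String.ofList ∘ String.toList) = id := by
        funext z; simp [String.ofList_toList]
      rw [this, List.map_id]
    simp [this]

theorem strip_ofList (x : List Char) :
    PySem.Str.strip (String.ofList x) = String.ofList (PySem.Chars.strip x) := by
  have h : (PySem.Str.strip (String.ofList x)).toList = PySem.Chars.strip x := by
    rw [PySem.Str.toList_strip, String.toList_ofList]
  calc PySem.Str.strip (String.ofList x)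
      = String.ofList (PySem.Str.strip (String.ofList x)).toList := by
        rw [String.ofList_toList]
    _ = String.ofList (PySem.Chars.strip x) := by rw [h]

theorem msfS_map_ofList (L : List (List Char)) :
    msfS (L.map String.ofList) = (msf L).map String.ofList := by
  induction L with
  | nil => rfl
  | cons x t ih =>
    simp only [List.map_cons, msfS, List.filter_cons, msf] at *
    rw [strip_ofList]
    by_cases hx : (PySem.Chars.strip x).isEmpty
    · have hx' : PySem.Chars.strip x = [] := by simpa using hx
      have : (String.ofList (PySem.Chars.strip x) != "") = false := by
        simp [hx']
      rw [this, hx']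
      simp only [List.isEmpty_nil, Bool.not_true, Bool.false_eq_true, if_false]
      simpa [msfS, msf] using ih
    · have hx' : PySem.Chars.strip x ≠ [] := by simpa using hx
      have : (String.ofList (PySem.Chars.strip x) != "") = true := by
        simpa using hx'
      rw [this]
      have hne : ((PySem.Chars.strip x).isEmpty = false) := by simpa using hx'
      simp only [hne, Bool.not_false]
      simpa [msfS, msf, List.map_map] using ih

theorem gA_eq (s : String) : gA s = (FC s.toList).map String.ofList := by
  unfold gA
  have hst : (PySem.Str.strip s).toList = PySem.Chars.strip s.toList :=
    PySem.Str.toList_strip s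
  by_cases hx : PySem.Str.strip s = ""
  · have h0 : PySem.Chars.strip s.toList = [] := by
      rw [← hst, hx]; rfl
    rw [if_pos hx, ← FC_strip, h0, FC_nil]
    rfl
  · rw [if_neg hx, split?_comma_getD, msfS_map_ofList, ← FC]
    have : (PySem.Str.strip s).toList = PySem.Chars.strip s.toList := hst
    rw [this, FC_strip]

theorem portB_eq (cols : List String) :
    parse_versions_py_alt cols = cols.flatMap (fun s => (FC s.toList).map String.ofList) := by
  unfold parse_versions_py_alt
  rw [filter_map_strip, split?_comma_getD, msfS_map_ofList, ← FC]
  have hJ : (PySem.Str.join "," cols).toList =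
      PySem.Chars.join [','] (cols.map String.toList) := by
    rw [PySem.Str.toList_join]; rfl
  rw [hJ, FC_join, List.flatMap_map]
  simp [List.map_flatMap]

-- ===== VERDICT (by name: the statement is the Claim_ definition above) =====
theorem parse_versions_py_spec : Claim_equal_parse_versions_py := by
  intro cols _
  unfold Spec_parse_versions_py
  rw [portA_eq_flatMap, portB_eq]
  congr 1
  funext s
  rw [gA_eq]
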